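-- pv_equiv track=rewrite | github.com/Pranjal1423/MoodCanvas | backend/art_generator.py | get_emotion_enhancement
-- ===== SOURCE A (Python) =====
-- def get_emotion_enhancement(prompt_lower):
--     """Get emotion-specific enhancements"""
--
--     if any(word in prompt_lower for word in ['happy', 'joy', 'excited', 'cheerful']):
--         return "bright vibrant colors, joyful atmosphere, energetic, golden light, uplifting mood"
--
--     elif any(word in prompt_lower for word in ['sad', 'depressed', 'blue', 'down']):
--         return "cool blue tones, melancholic atmosphere, soft lighting, gentle, emotional depth"
--
--     elif any(word in prompt_lower for word in ['angry', 'mad', 'furious', 'rage']):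
--         return "intense red and orange colors, dramatic lighting, powerful, dynamic composition"
--
--     elif any(word in prompt_lower for word in ['calm', 'peaceful', 'serene', 'relaxed']):
--         return "peaceful atmosphere, zen, soft pastels, tranquil mood, minimalist, harmony"
--
--     elif any(word in prompt_lower for word in ['love', 'romantic', 'heart']):
--         return "warm pink and purple tones, romantic atmosphere, soft lighting, dreamy, beautiful"
--
--     elif any(word in prompt_lower for word in ['creative', 'artistic', 'inspired']):
--         return "abstract elements, creative composition, colorful, artistic masterpiece, imaginative"
--
--     elif any(word in prompt_lower for word in ['fear', 'scared', 'anxiety']):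
--         return "dark tones, mysterious atmosphere, dramatic shadows, intense mood"
--
--     else:
--         return "beautiful colors, artistic composition, balanced mood"
-- ===== SOURCE B (Python) =====
-- # B: flat keyword->priority map, aggregate the minimum matched priority, index a results array.
-- KEYWORD_PRIORITY = {
--     'happy': 0, 'joy': 0, 'excited': 0, 'cheerful': 0,
--     'sad': 1, 'depressed': 1, 'blue': 1, 'down': 1,
--     'angry': 2, 'mad': 2, 'furious': 2, 'rage': 2,
--     'calm': 3, 'peaceful': 3, 'serene': 3, 'relaxed': 3,
--     'love': 4, 'romantic': 4, 'heart': 4,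
--     'creative': 5, 'artistic': 5, 'inspired': 5,
--     'fear': 6, 'scared': 6, 'anxiety': 6,
-- }
--
-- RESULTS = [
--     "bright vibrant colors, joyful atmosphere, energetic, golden light, uplifting mood",
--     "cool blue tones, melancholic atmosphere, soft lighting, gentle, emotional depth",
--     "intense red and orange colors, dramatic lighting, powerful, dynamic composition",
--     "peaceful atmosphere, zen, soft pastels, tranquil mood, minimalist, harmony",
--     "warm pink and purple tones, romantic atmosphere, soft lighting, dreamy, beautiful",
--     "abstract elements, creative composition, colorful, artistic masterpiece, imaginative",
--     "dark tones, mysterious atmosphere, dramatic shadows, intense mood",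
--     "beautiful colors, artistic composition, balanced mood",  # default (lowest priority)
-- ]
--
--
-- def get_emotion_enhancement(prompt_lower):
--     """Get emotion-specific enhancements (min-priority aggregation over a flat keyword map)"""
--     best = len(RESULTS) - 1
--     for kw, prio in KEYWORD_PRIORITY.items():
--         if kw in prompt_lower:
--             best = min(best, prio)
--     return RESULTS[best]
-- ===== Notes on version B (the rewrite author's own statement) =====
-- stated objective: alternative
-- what changed: Replaces the ordered eight-way if/elif ladder (first matching keyword group wins, early return) with a min-reduction: a single flat keyword-to-priority dict is scanned once with no early exit, the minimum priority among ALL matched keywords is accumulated, and that priority indexes a results array (default sits at the last index); correctness: lowest matched priority = earliest matching branch of A.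
import Mathlib
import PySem

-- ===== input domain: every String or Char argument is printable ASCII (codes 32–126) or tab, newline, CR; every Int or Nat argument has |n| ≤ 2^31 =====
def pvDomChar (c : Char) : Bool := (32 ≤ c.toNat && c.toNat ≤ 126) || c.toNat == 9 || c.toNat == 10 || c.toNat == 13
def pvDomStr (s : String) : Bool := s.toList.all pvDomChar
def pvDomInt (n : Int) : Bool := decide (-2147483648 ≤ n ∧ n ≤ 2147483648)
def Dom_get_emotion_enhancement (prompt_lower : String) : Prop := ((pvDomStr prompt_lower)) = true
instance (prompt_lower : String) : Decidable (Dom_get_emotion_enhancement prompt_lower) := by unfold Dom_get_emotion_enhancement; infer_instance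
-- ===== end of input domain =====

-- B replaces A's ordered if/elif ladder (first match, early return) with a min-priority
-- aggregation over a flat keyword->priority map followed by an array lookup (alternative; same cost).
-- ===== PORT A =====
def get_emotion_enhancement (prompt_lower : String) : String :=
  if ["happy", "joy", "excited", "cheerful"].any (fun word => PySem.Str.isIn word prompt_lower) then
    "bright vibrant colors, joyful atmosphere, energetic, golden light, uplifting mood"
  else if ["sad", "depressed", "blue", "down"].any (fun word => PySem.Str.isIn word prompt_lower) then
    "cool blue tones, melancholic atmosphere, soft lighting, gentle, emotional depth"
  else if ["angry", "mad", "furious", "rage"].any (fun word => PySem.Str.isIn word prompt_lower) then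
    "intense red and orange colors, dramatic lighting, powerful, dynamic composition"
  else if ["calm", "peaceful", "serene", "relaxed"].any (fun word => PySem.Str.isIn word prompt_lower) then
    "peaceful atmosphere, zen, soft pastels, tranquil mood, minimalist, harmony"
  else if ["love", "romantic", "heart"].any (fun word => PySem.Str.isIn word prompt_lower) then
    "warm pink and purple tones, romantic atmosphere, soft lighting, dreamy, beautiful"
  else if ["creative", "artistic", "inspired"].any (fun word => PySem.Str.isIn word prompt_lower) then
    "abstract elements, creative composition, colorful, artistic masterpiece, imaginative"
  else if ["fear", "scared", "anxiety"].any (fun word => PySem.Str.isIn word prompt_lower) then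
    "dark tones, mysterious atmosphere, dramatic shadows, intense mood"
  else
    "beautiful colors, artistic composition, balanced mood"

-- ===== PORT B =====
-- flat keyword -> priority dict (insertion order; read-only, so a plain association list is exact)
def pvKeywordPriority : List (String × Nat) :=
  [("happy", 0), ("joy", 0), ("excited", 0), ("cheerful", 0),
   ("sad", 1), ("depressed", 1), ("blue", 1), ("down", 1),
   ("angry", 2), ("mad", 2), ("furious", 2), ("rage", 2),
   ("calm", 3), ("peaceful", 3), ("serene", 3), ("relaxed", 3),
   ("love", 4), ("romantic", 4), ("heart", 4),
   ("creative", 5), ("artistic", 5), ("inspired", 5),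
   ("fear", 6), ("scared", 6), ("anxiety", 6)]

def pvResults : List String :=
  ["bright vibrant colors, joyful atmosphere, energetic, golden light, uplifting mood",
   "cool blue tones, melancholic atmosphere, soft lighting, gentle, emotional depth",
   "intense red and orange colors, dramatic lighting, powerful, dynamic composition",
   "peaceful atmosphere, zen, soft pastels, tranquil mood, minimalist, harmony",
   "warm pink and purple tones, romantic atmosphere, soft lighting, dreamy, beautiful",
   "abstract elements, creative composition, colorful, artistic masterpiece, imaginative",
   "dark tones, mysterious atmosphere, dramatic shadows, intense mood",
   "beautiful colors, artistic composition, balanced mood"]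

def get_emotion_enhancement_alt (prompt_lower : String) : String :=
  -- RESULTS[best]: best ≤ len(RESULTS)-1 always holds, so getD is exact for Python's indexing here
  pvResults.getD
    (pvKeywordPriority.foldl
      (fun best kwp => if PySem.Str.isIn kwp.1 prompt_lower then min best kwp.2 else best)
      (pvResults.length - 1)) ""

-- ===== PRECONDITION & SPEC =====
def Spec_get_emotion_enhancement (prompt_lower : String) (out : String) : Prop := out = get_emotion_enhancement_alt prompt_lower
instance (prompt_lower : String) (out : String) : Decidable (Spec_get_emotion_enhancement prompt_lower out) := by unfold Spec_get_emotion_enhancement; infer_instance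

-- ===== CLAIM (what is proved, stated in full; the proofs are below) =====
def Claim_equal_get_emotion_enhancement : Prop := ∀ (prompt_lower : String), Dom_get_emotion_enhancement prompt_lower → Spec_get_emotion_enhancement prompt_lower (get_emotion_enhancement prompt_lower)

-- ===== LEMMAS AND PROOFS =====

-- folding one keyword group (all with the same priority i) is 'min with i if any keyword matches'
theorem pv_fold_group (p : String) (i : Nat) (ks : List String) (a : Nat) :
    List.foldl (fun best kwp => if PySem.Str.isIn kwp.1 p then min best kwp.2 else best) a
      (ks.map (fun k => (k, i)))
    = if ks.any (fun word => PySem.Str.isIn word p) then min a i else a := by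
  induction ks generalizing a with
  | nil => simp
  | cons k ks ih =>
    simp only [List.map_cons, List.foldl_cons, List.any_cons, ih]
    by_cases h : PySem.Str.isIn k p = true
    · simp only [h, Bool.true_or, if_true]
      split_ifs <;> simp
    · simp only [h, Bool.false_or]
      split_ifs with h1 h2 <;> simp_all

-- the flat dict is the seven groups in order
theorem pv_table_eq : pvKeywordPriority =
    (["happy", "joy", "excited", "cheerful"].map (fun k => (k, 0))) ++
    ((["sad", "depressed", "blue", "down"].map (fun k => (k, 1))) ++
    ((["angry", "mad", "furious", "rage"].map (fun k => (k, 2))) ++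
    ((["calm", "peaceful", "serene", "relaxed"].map (fun k => (k, 3))) ++
    ((["love", "romantic", "heart"].map (fun k => (k, 4))) ++
    ((["creative", "artistic", "inspired"].map (fun k => (k, 5))) ++
    (["fear", "scared", "anxiety"].map (fun k => (k, 6)))))))) := by
  rfl

-- ===== VERDICT (by name: the statement is the Claim_ definition above) =====
theorem get_emotion_enhancement_spec : Claim_equal_get_emotion_enhancement := by
  intro p _
  unfold Spec_get_emotion_enhancement get_emotion_enhancement get_emotion_enhancement_alt
  rw [pv_table_eq]
  simp only [List.foldl_append, pv_fold_group]
  split_ifs <;> rfl
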